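-- pv_equiv track=rewrite | github.com/andrewmcloud/advent2022 | day7.py | make_directory_size_mapping
-- ===== SOURCE A (Python) =====
-- from collections import defaultdict
--
-- def accumulate_dir_size(directory_size_map: dict, current_path: list[str], size: int) -> None:
--     if current_path:
--         directory_size_map["/".join(current_path)] += int(size)
--         accumulate_dir_size(directory_size_map, current_path[:-1], size)
--     return
--
-- def make_directory_size_mapping(commands: list[str]) -> dict[str, int]:
--     directory_size_map = defaultdict(int)
--     current_path = []
--
--     for command in commands:
--         match command.split():
--             # `$ cd ..` must be first case because `$ cd dir` also matches this pattern.
--             case['$', 'cd', '..']: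
--                 current_path.pop()
--             case['$', 'cd', directory]:
--                 current_path.append(directory) if directory != "/" else current_path.append("~")
--             # discard all other cases besides files
--             case['$' | 'dir', _]:
--                 continue
--             case[size, _]:
--                 accumulate_dir_size(directory_size_map, current_path, size)
--     return directory_size_map
-- ===== SOURCE B (Python) =====
-- def make_directory_size_mapping(commands: list[str]) -> dict[str, int]:
--     # Keep the current path as a stack of ready-made full directory keys; a file's
--     # size is added to each enclosing directory in one flat walk from the file's
--     # directory up to the root.
--     totals = {}
--     path = []  # full key of each directory on the current path, outermost first
--     for command in commands:
--         parts = command.split()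
--         if len(parts) == 3 and parts[0] == "$" and parts[1] == "cd":
--             if parts[2] == "..":
--                 path.pop()
--             else:
--                 name = "~" if parts[2] == "/" else parts[2]
--                 path.append(path[-1] + "/" + name if path else name)
--         elif len(parts) == 2 and parts[0] not in ("$", "dir"):
--             if path:
--                 size = int(parts[0])
--                 for key in reversed(path):
--                     totals[key] = totals.get(key, 0) + size
--     return totals
-- ===== Notes on version B (the rewrite author's own statement) =====
-- stated objective: idiomatic
-- what changed: B replaces A's per-file recursion, which slices the component path and re-joins the key string at every ancestor level, by a stack of ready-made full directory keys maintained across cd commands, so each file line is one flat dict-update walk over existing strings with no slicing, joining or recursion.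
import Mathlib
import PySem

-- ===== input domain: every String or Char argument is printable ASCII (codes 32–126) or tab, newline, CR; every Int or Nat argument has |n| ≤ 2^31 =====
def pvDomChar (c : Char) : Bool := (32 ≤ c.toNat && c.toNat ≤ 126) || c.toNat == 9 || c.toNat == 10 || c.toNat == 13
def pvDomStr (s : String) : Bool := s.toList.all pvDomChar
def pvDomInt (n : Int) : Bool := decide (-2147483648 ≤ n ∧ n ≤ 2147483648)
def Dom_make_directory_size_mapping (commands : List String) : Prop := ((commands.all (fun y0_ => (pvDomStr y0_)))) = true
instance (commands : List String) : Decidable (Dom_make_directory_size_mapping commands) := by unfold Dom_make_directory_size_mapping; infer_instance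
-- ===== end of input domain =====

-- B keeps the current path as a stack of ready-made full directory keys and adds a file's size
-- to each enclosing directory in one flat walk, replacing A's per-level recursion that slices
-- the path and re-joins the key string at every ancestor (objective: idiomatic).

-- ===== PORT A =====
-- `accumulate_dir_size`: recursion on the path, re-joining it at each level; `int(size)` is parsed
-- at each level; `(… ).getD 0` stands where Python raises ValueError — those inputs are outside Pre_.
def pvAccumA (d : PySem.Dict String Int) (path : List String) (size : String) : PySem.Dict String Int :=
  match path with
  | [] => d
  | x :: t =>
    pvAccumA (d.modify (PySem.Str.join "/" (x :: t)) 0 (· + (PySem.Int.ofStr? size).getD 0))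
      (x :: t).dropLast size
termination_by path.length
decreasing_by simp

-- one `match command.split()` step of A's loop, branches in A's case order
def pvStepA (st : PySem.Dict String Int × List String) (command : String) :
    PySem.Dict String Int × List String :=
  match PySem.Str.split₀ command with
  | [a, b, c] =>
    if a = "$" ∧ b = "cd" then
      if c = ".." then (st.1, st.2.dropLast)  -- `pop()`; Python raises IndexError on an empty path (outside Pre_)
      else (st.1, st.2 ++ [if c = "/" then "~" else c])
    else st
  | [a, _] =>
    if a = "$" ∨ a = "dir" then st
    else (pvAccumA st.1 st.2 a, st.2)
  | _ => st

def make_directory_size_mapping (commands : List String) : List (String × Int) :=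
  (commands.foldl pvStepA (PySem.Dict.empty, [])).1.items

-- ===== PORT B =====
-- one step of B's loop: state = (totals, path of full keys, outermost first);
-- a file line walks `reversed(path)` adding the size; `int(parts[0])` only at nonempty path
-- (ValueError there is outside Pre_); `pop()` on an empty path (IndexError) is outside Pre_ too.
def pvStepB (st : PySem.Dict String Int × List String) (command : String) :
    PySem.Dict String Int × List String :=
  match PySem.Str.split₀ command with
  | [a, b, c] =>
    if a = "$" ∧ b = "cd" then
      if c = ".." then (st.1, st.2.dropLast)
      else
        (st.1, st.2 ++ [match st.2.getLast? with
          | none => if c = "/" then "~" else c                      -- `name if not path`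
          | some k => k ++ "/" ++ (if c = "/" then "~" else c)])    -- `path[-1] + "/" + name`
    else st
  | [a, _] =>
    if a = "$" ∨ a = "dir" then st
    else if st.2 = [] then st
    else (st.2.reverse.foldl
            (fun d k => d.insert k (d.getD k 0 + (PySem.Int.ofStr? a).getD 0)) st.1, st.2)
  | _ => st

def make_directory_size_mapping_alt (commands : List String) : List (String × Int) :=
  (commands.foldl pvStepB (PySem.Dict.empty, [])).1.items

-- ===== PRECONDITION & SPEC =====
-- Exactly the inputs on which Python's A returns: every `$ cd ..` happens at positive depth
-- (else `pop()` raises IndexError), and every file line reached at positive depth has an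
-- `int()`-parseable size token (else ValueError).  Only a depth counter is tracked.
def pvPreA (depth : Int) (commands : List String) : Bool :=
  match commands with
  | [] => true
  | c :: cs =>
    match PySem.Str.split₀ c with
    | [a, b, x] =>
      if a = "$" ∧ b = "cd" then
        if x = ".." then decide (0 < depth) && pvPreA (depth - 1) cs
        else pvPreA (depth + 1) cs
      else pvPreA depth cs
    | [a, _] =>
      if a = "$" ∨ a = "dir" then pvPreA depth cs
      else (decide (depth = 0) || (PySem.Int.ofStr? a).isSome) && pvPreA depth cs
    | _ => pvPreA depth cs

def Pre_make_directory_size_mapping (commands : List String) : Prop :=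
  pvPreA 0 commands = true
instance (commands : List String) : Decidable (Pre_make_directory_size_mapping commands) := by
  unfold Pre_make_directory_size_mapping; infer_instance

def pvWitness_make_directory_size_mapping : List String :=
  ["$ cd /", "$ ls", "dir a", "100 b.txt", "$ cd a", "7 c.dat", "$ cd ..", "200 d"]

def Spec_make_directory_size_mapping (commands : List String) (out : List (String × Int)) : Prop :=
  out = make_directory_size_mapping_alt commands
instance (commands : List String) (out : List (String × Int)) :
    Decidable (Spec_make_directory_size_mapping commands out) := by
  unfold Spec_make_directory_size_mapping; infer_instance

-- ===== CLAIM (what is proved, stated in full; the proofs are below) =====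
def Claim_equal_make_directory_size_mapping : Prop :=
  ∀ (commands : List String), Dom_make_directory_size_mapping commands →
    Pre_make_directory_size_mapping commands →
      Spec_make_directory_size_mapping commands (make_directory_size_mapping commands)

-- ===== LEMMAS AND PROOFS =====

-- the chain of "/"-joined path prefixes, deepest first: exactly the keys A's accumulate touches
def pvChain (path : List String) : List String :=
  match path with
  | [] => []
  | x :: t => PySem.Str.join "/" (x :: t) :: pvChain (x :: t).dropLast
termination_by path.length
decreasing_by simp

theorem pvIntercal_append (sep y : List Char) (l : List (List Char)) (hl : l ≠ []) :
    sep.intercalate (l ++ [y]) = sep.intercalate l ++ sep ++ y := by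
  induction l with
  | nil => cases hl rfl
  | cons x t ih =>
    cases t with
    | nil => simp [List.intercalate, List.intersperse]
    | cons z t2 =>
      have := ih (by simp)
      simp only [List.cons_append]
      simp [List.intercalate, List.intersperse] at this ⊢
      simp [this]

theorem pvJoin_append (p : List String) (hp : p ≠ []) (x : String) :
    PySem.Str.join "/" (p ++ [x]) = PySem.Str.join "/" p ++ "/" ++ x := by
  apply String.toList_inj.mp
  simp only [String.toList_append, PySem.Str.toList_join, PySem.Chars.join, List.map_append,
    List.map_cons, List.map_nil]
  exact pvIntercal_append _ _ _ (by simpa using hp)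

theorem pvJoin_singleton (x : String) : PySem.Str.join "/" [x] = x := by
  apply String.toList_inj.mp
  simp [PySem.Str.toList_join, PySem.Chars.join, List.intercalate]

theorem pvChain_cons (path : List String) (hp : path ≠ []) :
    pvChain path = PySem.Str.join "/" path :: pvChain path.dropLast := by
  cases path with
  | nil => cases hp rfl
  | cons a t => rw [pvChain]

theorem pvChain_nil_iff (path : List String) : pvChain path = [] ↔ path = [] := by
  cases path with
  | nil => simp [pvChain]
  | cons a t => rw [pvChain]; simp

theorem pvChain_tail (path : List String) : pvChain path.dropLast = (pvChain path).tail := by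
  cases path with
  | nil => simp [pvChain]
  | cons a t => rw [pvChain]; rfl

theorem pvReverse_dropLast {α : Type} (l : List α) : l.dropLast.reverse = l.reverse.tail := by
  induction l with
  | nil => rfl
  | cons a t ih =>
    cases t with
    | nil => rfl
    | cons b r =>
      simp only [List.dropLast_cons₂, List.reverse_cons, ih,
        List.tail_append_of_ne_nil (xs := r.reverse ++ [b]) (ys := [a]) (by simp)]

-- A's recursive ancestor update is the fold of B's per-key update over the prefix chain
theorem pvAccumA_eq_fold (path : List String) (d : PySem.Dict String Int) (size : String) :
    pvAccumA d path size =
      (pvChain path).foldl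
        (fun d k => d.insert k (d.getD k 0 + (PySem.Int.ofStr? size).getD 0)) d := by
  induction path using pvChain.induct generalizing d with
  | case1 => rw [pvAccumA, pvChain]; rfl
  | case2 a t ih =>
    rw [pvAccumA, pvChain, List.foldl_cons]
    exact ih _

-- one command preserves the invariant: same dict, and B's key stack reversed is A's prefix chain
theorem pvStep_eq (c : String) (d : PySem.Dict String Int) (patha keys : List String)
    (h : keys.reverse = pvChain patha) :
    (pvStepB (d, keys) c).1 = (pvStepA (d, patha) c).1 ∧
      (pvStepB (d, keys) c).2.reverse = pvChain (pvStepA (d, patha) c).2 := by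
  cases hsplit : PySem.Str.split₀ c with
  | nil => simp only [pvStepA, pvStepB, hsplit]; exact ⟨by trivial, h⟩
  | cons t1 l1 =>
  cases l1 with
  | nil => simp only [pvStepA, pvStepB, hsplit]; exact ⟨by trivial, h⟩
  | cons t2 l2 =>
  cases l2 with
  | cons t3 l3 =>
    cases l3 with
    | cons t4 l4 => simp only [pvStepA, pvStepB, hsplit]; exact ⟨by trivial, h⟩
    | nil =>
      -- three tokens
      simp only [pvStepA, pvStepB, hsplit]
      by_cases hcd : t1 = "$" ∧ t2 = "cd"
      · rw [if_pos hcd, if_pos hcd]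
        by_cases hup : t3 = ".."
        · -- `$ cd ..`
          rw [if_pos hup, if_pos hup]
          refine ⟨rfl, ?_⟩
          rw [pvReverse_dropLast, h, pvChain_tail]
        · -- `$ cd dir`
          rw [if_neg hup, if_neg hup]
          refine ⟨rfl, ?_⟩
          dsimp only
          rw [List.reverse_append, List.reverse_singleton, List.singleton_append]
          have hdrop : (patha ++ [if t3 = "/" then "~" else t3]).dropLast = patha :=
            List.dropLast_concat ..
          rw [pvChain_cons (patha ++ [if t3 = "/" then "~" else t3]) (by simp), hdrop, ← h]
          congr 1
          cases hlast : keys.getLast? with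
          | none =>
            have hkeys : keys = [] := List.getLast?_eq_none_iff.mp hlast
            subst hkeys
            have hpa : patha = [] := (pvChain_nil_iff patha).mp (by simpa using h.symm)
            subst hpa
            simp [pvJoin_singleton]
          | some k =>
            have hne : keys ≠ [] := by
              intro hk; subst hk; simp at hlast
            have hpa : patha ≠ [] := by
              intro hp; subst hp
              rw [show pvChain [] = [] from by simp [pvChain]] at h
              simp [hne] at h
            have hhead : (pvChain patha).head? = some k := by
              rw [← h, List.head?_reverse, hlast]
            rw [pvChain_cons patha hpa] at hhead
            simp only [List.head?_cons, Option.some.injEq] at hhead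
            rw [pvJoin_append patha hpa, hhead]
      · rw [if_neg hcd, if_neg hcd]; exact ⟨by trivial, h⟩
  | nil =>
    -- two tokens
    simp only [pvStepA, pvStepB, hsplit]
    by_cases hsys : t1 = "$" ∨ t1 = "dir"
    · rw [if_pos hsys, if_pos hsys]; exact ⟨by trivial, h⟩
    · rw [if_neg hsys, if_neg hsys]
      by_cases hk : keys = []
      · subst hk
        rw [if_pos rfl]
        have hpa : patha = [] := (pvChain_nil_iff patha).mp (by simpa using h.symm)
        subst hpa
        exact ⟨by rw [pvAccumA], by simpa using h⟩
      · rw [if_neg hk]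
        exact ⟨by rw [pvAccumA_eq_fold, ← h], h⟩

theorem pvFold_eq (commands : List String) (d : PySem.Dict String Int)
    (patha keys : List String) (h : keys.reverse = pvChain patha) :
    (commands.foldl pvStepB (d, keys)).1 = (commands.foldl pvStepA (d, patha)).1 ∧
      (commands.foldl pvStepB (d, keys)).2.reverse =
        pvChain (commands.foldl pvStepA (d, patha)).2 := by
  induction commands generalizing d patha keys with
  | nil => exact ⟨by trivial, h⟩
  | cons c cs ih =>
    simp only [List.foldl_cons]
    obtain ⟨h1, h2⟩ := pvStep_eq c d patha keys h
    have ha : pvStepA (d, patha) c = ((pvStepA (d, patha) c).1, (pvStepA (d, patha) c).2) := rfl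
    have hb : pvStepB (d, keys) c = ((pvStepB (d, keys) c).1, (pvStepB (d, keys) c).2) := rfl
    rw [ha, hb, h1]
    exact ih _ _ _ h2

-- ===== VERDICT (by name: the statement is the Claim_ definition above) =====
theorem make_directory_size_mapping_spec : Claim_equal_make_directory_size_mapping := by
  intro commands _hdom _hpre
  unfold Spec_make_directory_size_mapping make_directory_size_mapping
    make_directory_size_mapping_alt
  have h := pvFold_eq commands PySem.Dict.empty [] [] (by simp [pvChain])
  rw [h.1]
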